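-- pv_equiv track=rewrite | github.com/EvertonKauan/color-based | video_annotator.py | match_athlete_colors
-- ===== SOURCE A (Python) =====
-- from typing import Dict, List, Tuple, Optional
--
-- def validate_unique_combinations(expected_athletes: Dict[str, Dict[str, str]]) -> bool:
--     """Return True if each athlete has a unique (Kimono, Belt) pair."""
--     if len(expected_athletes) < 2:
--         return True
--
--     combinations = []
--     for athlete_id, colors in expected_athletes.items():
--         kimono = colors.get("Kimono", "").lower()
--         belt = colors.get("Belt", "").lower()
--
--         if kimono == "undefined":
--             kimono = "unknown"
--         if belt == "undefined":
--             belt = "unknown"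
--
--         combo = (kimono, belt)
--         if combo in combinations:
--             return False
--         combinations.append(combo)
--
--     return True
--
-- def match_athlete_colors(
--     detected_kimono: str,
--     detected_belt: str,
--     expected_athletes: Dict[str, Dict[str, str]]
-- ) -> Optional[str]:
--     """
--     Match detected colors to expected athletes.
--     Assumes unique kimono+belt combinations in the config.
--     Returns athlete id ("1" or "2") on a unique match, else None.
--     """
--     if not expected_athletes:
--         return None
--
--     # Validate expected combinations are unique.
--     if not validate_unique_combinations(expected_athletes):
--         # Duplicate expected colors: skip reliable matching.
--         return None
--
--     detected_kimono_lower = detected_kimono.lower()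
--     detected_belt_lower = detected_belt.lower()
--
--     # Both unknown: no match.
--     if detected_kimono_lower == "unknown" and detected_belt_lower == "unknown":
--         return None
--
--     # Build detected combo for uniqueness checks.
--     detected_combo = (detected_kimono_lower, detected_belt_lower)
--
--     matches = []
--
--     for athlete_id, colors in expected_athletes.items():
--         expected_kimono = colors.get("Kimono", "").lower()
--         expected_belt = colors.get("Belt", "").lower()
--
--         if expected_kimono == "undefined":
--             expected_kimono = "unknown"
--         if expected_belt == "undefined":
--             expected_belt = "unknown"
--
--         expected_combo = (expected_kimono, expected_belt)
--
--         # Exact kimono+belt match.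
--         if detected_combo == expected_combo:
--             matches.append((athlete_id, 10))  # High score for exact match.
--         # Partial: kimono exact and belt compatible.
--         elif detected_kimono_lower == expected_kimono and detected_kimono_lower != "unknown":
--             if detected_belt_lower == "unknown" or expected_belt == "unknown":
--                 matches.append((athlete_id, 5))  # Medium score for partial match.
--         # Weak: kimono-only partial match.
--         elif detected_kimono_lower != "unknown" and expected_kimono != "unknown":
--             if detected_kimono_lower == expected_kimono:
--                 matches.append((athlete_id, 2))  # Low score.
--
--     # Multiple matches: need stronger signal.
--     if len(matches) == 0:
--         return None
--
--     # Sort by score descending.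
--     matches.sort(key=lambda x: x[1], reverse=True)
--
--     # Strong unique best match: return it.
--     if matches[0][1] >= 5:
--         # Tie on best score?
--         best_score = matches[0][1]
--         best_matches = [m for m in matches if m[1] == best_score]
--
--         if len(best_matches) == 1:
--             return best_matches[0][0]
--         # Ambiguous tie: return None.
--         return None
--
--     # Low scores: return only if unique.
--     if len(matches) == 1:
--         return matches[0][0]
--
--     return None
-- ===== SOURCE B (Python) =====
-- from typing import Dict, Optional
--
--
-- def _norm(colors):
--     k = colors.get("Kimono", "").lower()
--     b = colors.get("Belt", "").lower()
--     if k == "undefined":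
--         k = "unknown"
--     if b == "undefined":
--         b = "unknown"
--     return (k, b)
--
--
-- def _score(dk, db, colors):
--     ek, eb = _norm(colors)
--     if (dk, db) == (ek, eb):
--         return 10
--     if dk == ek and dk != "unknown":
--         return 5 if (db == "unknown" or eb == "unknown") else 0
--     if dk != "unknown" and ek != "unknown" and dk == ek:
--         return 2
--     return 0
--
--
-- def validate_unique_combinations(expected_athletes):
--     if len(expected_athletes) < 2:
--         return True
--     seen = set()
--     for colors in expected_athletes.values():
--         combo = _norm(colors)
--         if combo in seen:
--             return False
--         seen.add(combo)
--     return True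
--
--
-- def match_athlete_colors(detected_kimono, detected_belt, expected_athletes):
--     if not expected_athletes:
--         return None
--     if not validate_unique_combinations(expected_athletes):
--         return None
--     dk = detected_kimono.lower()
--     db = detected_belt.lower()
--     if dk == "unknown" and db == "unknown":
--         return None
--     best_score = 0
--     best_id = None
--     count_at_best = 0
--     total = 0
--     for athlete_id, colors in expected_athletes.items():
--         s = _score(dk, db, colors)
--         if s == 0:
--             continue
--         total += 1
--         if s > best_score:
--             best_score, best_id, count_at_best = s, athlete_id, 1
--         elif s == best_score:
--             count_at_best += 1
--     if total == 0:
--         return None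
--     if best_score >= 5:
--         return best_id if count_at_best == 1 else None
--     return best_id if total == 1 else None
-- ===== Notes on version B (the rewrite author's own statement) =====
-- stated objective: simpler
-- what changed: B replaces A's build-a-(id,score)-list + stable descending sort + filter-for-ties post-pass with a single pass over the athletes that maintains (best_score, best_id, count_at_best, total_match_count) and decides from those four counters; validate_unique_combinations uses a set of seen combos instead of a list membership scan.
import Mathlib
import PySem

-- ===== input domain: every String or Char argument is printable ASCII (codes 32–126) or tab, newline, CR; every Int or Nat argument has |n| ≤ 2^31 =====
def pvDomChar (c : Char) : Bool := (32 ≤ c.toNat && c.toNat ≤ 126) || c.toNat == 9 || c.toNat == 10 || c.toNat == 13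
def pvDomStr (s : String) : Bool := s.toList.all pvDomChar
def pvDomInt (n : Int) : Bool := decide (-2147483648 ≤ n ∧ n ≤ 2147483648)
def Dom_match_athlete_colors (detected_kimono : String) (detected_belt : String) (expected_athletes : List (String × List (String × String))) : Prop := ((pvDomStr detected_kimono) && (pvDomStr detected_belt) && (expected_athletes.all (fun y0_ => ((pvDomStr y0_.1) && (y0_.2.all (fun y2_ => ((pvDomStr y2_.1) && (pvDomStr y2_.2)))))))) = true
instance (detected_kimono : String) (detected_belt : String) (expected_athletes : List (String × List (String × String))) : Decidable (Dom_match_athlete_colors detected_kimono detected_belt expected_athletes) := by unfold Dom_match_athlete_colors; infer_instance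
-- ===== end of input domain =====

-- B replaces A's match-list build + stable sort + filter with a single pass keeping
-- (best_score, best_id, count_at_best, total); objective: simpler (no measured speed claim).

-- ===== PORT A =====
-- Shared normalization: both Pythons compute exactly these values for an athlete's colors dict.
def pvNormColors (colors : List (String × String)) : String × String :=
  let cd := PySem.Dict.ofList colors
  let k := PySem.Str.lower (cd.getD "Kimono" "")
  let b := PySem.Str.lower (cd.getD "Belt" "")
  (if k = "undefined" then "unknown" else k, if b = "undefined" then "unknown" else b)

def pvValidateLoopA : List (String × List (String × String)) → List (String × String) → Bool
  | [], _ => true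
  | (_, colors) :: rest, combos =>
    let combo := pvNormColors colors
    if combo ∈ combos then false
    else pvValidateLoopA rest (combos ++ [combo])

def validate_unique_combinations (d : PySem.Dict String (List (String × String))) : Bool :=
  if d.size < 2 then true else pvValidateLoopA d.items []

def pvMatchLoopA (dk db : String) : List (String × List (String × String)) → List (String × Int) → List (String × Int)
  | [], ms => ms
  | (aid, colors) :: rest, ms =>
    let ec := pvNormColors colors
    let ms' :=
      if (dk, db) = ec then ms ++ [(aid, (10 : Int))]
      else if dk = ec.1 ∧ dk ≠ "unknown" then
        (if db = "unknown" ∨ ec.2 = "unknown" then ms ++ [(aid, (5 : Int))] else ms)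
      else if dk ≠ "unknown" ∧ ec.1 ≠ "unknown" then
        (if dk = ec.1 then ms ++ [(aid, (2 : Int))] else ms)
      else ms
    pvMatchLoopA dk db rest ms'

def match_athlete_colors (detected_kimono : String) (detected_belt : String) (expected_athletes : List (String × List (String × String))) : Option String :=
  let d := PySem.Dict.ofList expected_athletes
  if d.items.isEmpty then none
  else if !(validate_unique_combinations d) then none
  else
    let dk := PySem.Str.lower detected_kimono
    let db := PySem.Str.lower detected_belt
    if dk = "unknown" ∧ db = "unknown" then none
    else
      let ms := pvMatchLoopA dk db d.items []
      if ms.length = 0 then none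
      else
        match PySem.List.sorted ms (fun x => x.2) true with
        | [] => none  -- unreachable totality guard (ms ≠ [])
        | m :: t =>
          if 5 ≤ m.2 then
            let best := m.2
            let bm := (m :: t).filter (fun x => x.2 == best)
            if bm.length = 1 then bm.head?.map (fun x => x.1) else none
          else if ms.length = 1 then ms.head?.map (fun x => x.1) else none

-- ===== PORT B =====
def pvScoreB (dk db : String) (colors : List (String × String)) : Int :=
  let ec := pvNormColors colors
  if (dk, db) = ec then 10
  else if dk = ec.1 ∧ dk ≠ "unknown" then
    (if db = "unknown" ∨ ec.2 = "unknown" then 5 else 0)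
  else if dk ≠ "unknown" ∧ ec.1 ≠ "unknown" ∧ dk = ec.1 then 2
  else 0

def pvValidateLoopB : List (String × List (String × String)) → PySem.Set (String × String) → Bool
  | [], _ => true
  | (_, colors) :: rest, seen =>
    let combo := pvNormColors colors
    if PySem.Set.contains seen combo then false
    else pvValidateLoopB rest (PySem.Set.add seen combo)

def pvValidateB (d : PySem.Dict String (List (String × String))) : Bool :=
  if d.size < 2 then true else pvValidateLoopB d.items PySem.Set.empty

-- state: (best_score, best_id, count_at_best, total)
def pvBestLoopB (dk db : String) : List (String × List (String × String)) → Int × Option String × Int × Int → Int × Option String × Int × Int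
  | [], st => st
  | (aid, colors) :: rest, st =>
    let s := pvScoreB dk db colors
    if s = 0 then pvBestLoopB dk db rest st
    else
      let st' :=
        if st.1 < s then (s, some aid, (1 : Int), st.2.2.2 + 1)
        else if s = st.1 then (st.1, st.2.1, st.2.2.1 + 1, st.2.2.2 + 1)
        else (st.1, st.2.1, st.2.2.1, st.2.2.2 + 1)
      pvBestLoopB dk db rest st'

def match_athlete_colors_alt (detected_kimono : String) (detected_belt : String) (expected_athletes : List (String × List (String × String))) : Option String :=
  let d := PySem.Dict.ofList expected_athletes
  if d.items.isEmpty then none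
  else if !(pvValidateB d) then none
  else
    let dk := PySem.Str.lower detected_kimono
    let db := PySem.Str.lower detected_belt
    if dk = "unknown" ∧ db = "unknown" then none
    else
      let st := pvBestLoopB dk db d.items (0, none, 0, 0)
      if st.2.2.2 = 0 then none
      else if 5 ≤ st.1 then (if st.2.2.1 = 1 then st.2.1 else none)
      else if st.2.2.2 = 1 then st.2.1 else none

-- ===== PRECONDITION & SPEC =====
def Spec_match_athlete_colors (detected_kimono : String) (detected_belt : String) (expected_athletes : List (String × List (String × String))) (out : Option String) : Prop := out = match_athlete_colors_alt detected_kimono detected_belt expected_athletes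
instance (detected_kimono : String) (detected_belt : String) (expected_athletes : List (String × List (String × String))) (out : Option String) : Decidable (Spec_match_athlete_colors detected_kimono detected_belt expected_athletes out) := by unfold Spec_match_athlete_colors; infer_instance

-- ===== CLAIM (what is proved, stated in full; the proofs are below) =====
def Claim_equal_match_athlete_colors : Prop := ∀ (detected_kimono : String) (detected_belt : String) (expected_athletes : List (String × List (String × String))), Dom_match_athlete_colors detected_kimono detected_belt expected_athletes → Spec_match_athlete_colors detected_kimono detected_belt expected_athletes (match_athlete_colors detected_kimono detected_belt expected_athletes)

-- ===== LEMMAS AND PROOFS =====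

-- the two validate loops agree
theorem pvValidate_eq (items : List (String × List (String × String))) (acc : List (String × String)) :
    pvValidateLoopA items acc = pvValidateLoopB items acc := by
  induction items generalizing acc with
  | nil => rfl
  | cons hd tl ih =>
    obtain ⟨id, colors⟩ := hd
    by_cases hmem : pvNormColors colors ∈ acc
    · simp [pvValidateLoopA, pvValidateLoopB, PySem.Set.contains, hmem]
    · simp [pvValidateLoopA, pvValidateLoopB, PySem.Set.contains, PySem.Set.add, hmem, ih]

-- B's per-item update of the fold state, expressed on a (id, score) pair
def pvStepB (st : Int × Option String × Int × Int) (p : String × Int) : Int × Option String × Int × Int :=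
  if p.2 = 0 then st
  else if st.1 < p.2 then (p.2, some p.1, 1, st.2.2.2 + 1)
  else if p.2 = st.1 then (st.1, st.2.1, st.2.2.1 + 1, st.2.2.2 + 1)
  else (st.1, st.2.1, st.2.2.1, st.2.2.2 + 1)

-- A's per-item list extension is "append the scored pair unless the score is 0"
theorem pvContribution (dk db aid : String) (colors : List (String × String)) (ms : List (String × Int)) (rest) :
    pvMatchLoopA dk db ((aid, colors) :: rest) ms =
      pvMatchLoopA dk db rest (ms ++ (if pvScoreB dk db colors = 0 then [] else [(aid, pvScoreB dk db colors)])) := by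
  simp only [pvMatchLoopA, pvScoreB]
  generalize pvNormColors colors = ec
  split_ifs <;> simp_all

theorem pvScore_cases (dk db : String) (colors : List (String × String)) :
    pvScoreB dk db colors = 0 ∨ pvScoreB dk db colors = 5 ∨ pvScoreB dk db colors = 10 := by
  simp only [pvScoreB]
  generalize pvNormColors colors = ec
  split_ifs <;> tauto

theorem pvMatchLoopA_append (dk db : String) (items) (a b : List (String × Int)) :
    pvMatchLoopA dk db items (a ++ b) = a ++ pvMatchLoopA dk db items b := by
  induction items generalizing b with
  | nil => rfl
  | cons hd tl ih =>
    obtain ⟨aid, colors⟩ := hd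
    simp only [pvMatchLoopA]
    split_ifs <;> (try rw [List.append_assoc]) <;> exact ih _

theorem pvBestLoop_eq_foldl (dk db : String) (items) (st) :
    pvBestLoopB dk db items st = (pvMatchLoopA dk db items []).foldl pvStepB st := by
  induction items generalizing st with
  | nil => rfl
  | cons hd tl ih =>
    obtain ⟨aid, colors⟩ := hd
    rw [pvContribution, List.nil_append]
    have hc : pvMatchLoopA dk db tl (if pvScoreB dk db colors = 0 then [] else [(aid, pvScoreB dk db colors)]) = (if pvScoreB dk db colors = 0 then [] else [(aid, pvScoreB dk db colors)]) ++ pvMatchLoopA dk db tl [] := by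
      conv_lhs => rw [← List.append_nil (if pvScoreB dk db colors = 0 then ([] : List (String × Int)) else [(aid, pvScoreB dk db colors)])]
      exact pvMatchLoopA_append dk db tl _ _
    rw [hc, List.foldl_append]
    by_cases hs : pvScoreB dk db colors = 0
    · simp only [pvBestLoopB, hs, if_true, List.foldl_nil]
      exact ih st
    · simp only [pvBestLoopB, hs, if_false, List.foldl_cons, List.foldl_nil]
      rw [ih]
      congr 1
      simp [pvStepB, hs]

theorem pvMatches_scores (dk db : String) (items) :
    ∀ p ∈ pvMatchLoopA dk db items [], p.2 = 5 ∨ p.2 = 10 := by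
  induction items with
  | nil => intro p hp; simp [pvMatchLoopA] at hp
  | cons hd tl ih =>
    obtain ⟨aid, colors⟩ := hd
    rw [pvContribution, List.nil_append]
    have hc : pvMatchLoopA dk db tl (if pvScoreB dk db colors = 0 then [] else [(aid, pvScoreB dk db colors)]) = (if pvScoreB dk db colors = 0 then [] else [(aid, pvScoreB dk db colors)]) ++ pvMatchLoopA dk db tl [] := by
      conv_lhs => rw [← List.append_nil (if pvScoreB dk db colors = 0 then ([] : List (String × Int)) else [(aid, pvScoreB dk db colors)])]
      exact pvMatchLoopA_append dk db tl _ _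
    rw [hc]
    intro p hp
    rcases List.mem_append.mp hp with hmem | hmem
    · rcases pvScore_cases dk db colors with h0 | h5 | h10
      · simp [h0] at hmem
      · simp [h5] at hmem; simp [hmem]
      · simp [h10] at hmem; simp [hmem]
    · exact ih p hmem

-- running maximum of the scores
def pvM (ms : List (String × Int)) : Int := ms.foldl (fun a p => max a p.2) 0

theorem pvM_append (ms : List (String × Int)) (p : String × Int) : pvM (ms ++ [p]) = max (pvM ms) p.2 := by
  simp [pvM, List.foldl_append]

theorem pvM_bound (ms : List (String × Int)) : ∀ q ∈ ms, q.2 ≤ pvM ms :=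
  (PySem.List.le_foldl_max_int ms (fun p => p.2) 0).2

theorem pvM_attained (ms : List (String × Int)) : pvM ms = 0 ∨ ∃ q ∈ ms, pvM ms = q.2 := by
  induction ms using List.reverseRecOn with
  | nil => left; rfl
  | append_singleton ms p ih =>
    rw [pvM_append]
    rcases le_or_gt (pvM ms) p.2 with hle | hgt
    · right; refine ⟨p, by simp, ?_⟩; rw [max_eq_right hle]
    · rw [max_eq_left (le_of_lt hgt)]
      rcases ih with h0 | ⟨q, hq, he⟩
      · left; exact h0
      · right; exact ⟨q, by simp [hq], he⟩

theorem pvFoldl_invariant (ms : List (String × Int)) (h : ∀ p ∈ ms, p.2 = 5 ∨ p.2 = 10) :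
    ms.foldl pvStepB (0, none, 0, 0) =
      (pvM ms, (ms.find? (fun p => p.2 == pvM ms)).map (fun p => p.1),
        (ms.countP (fun p => p.2 == pvM ms) : Int), (ms.length : Int)) := by
  induction ms using List.reverseRecOn with
  | nil => rfl
  | append_singleton ms p ih =>
    have hms : ∀ q ∈ ms, q.2 = 5 ∨ q.2 = 10 := fun q hq => h q (by simp [hq])
    have hp : p.2 = 5 ∨ p.2 = 10 := h p (by simp)
    have hbound := pvM_bound ms
    rw [List.foldl_append, ih hms, List.foldl_cons, List.foldl_nil]
    rcases lt_trichotomy (pvM ms) p.2 with hgt | heq | hlt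
    · have hM : pvM (ms ++ [p]) = p.2 := by rw [pvM_append, max_eq_right (le_of_lt hgt)]
      have hfind : ms.find? (fun q => q.2 == pvM (ms ++ [p])) = none := by
        rw [List.find?_eq_none]
        intro x hx
        have := hbound x hx
        simp only [hM, beq_iff_eq]
        omega
      have hcnt : ms.countP (fun q => q.2 == pvM (ms ++ [p])) = 0 := by
        rw [List.countP_eq_zero]
        intro x hx
        have := hbound x hx
        simp only [hM, beq_iff_eq]
        omega
      simp only [pvStepB]
      rw [if_neg (by omega : ¬ ((p.2 : Int) = 0)), if_pos hgt]
      rw [List.find?_append, hfind, List.countP_append, hcnt, List.length_append]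
      simp [hM]
    · have hM : pvM (ms ++ [p]) = pvM ms := by rw [pvM_append, max_eq_left (le_of_eq heq.symm)]
      have hne : ms ≠ [] := by
        intro hnil
        subst hnil
        simp [pvM] at heq
        omega
      obtain ⟨q, hq, hqe⟩ : ∃ q ∈ ms, pvM ms = q.2 := by
        rcases pvM_attained ms with h0 | hq
        · exfalso; omega
        · exact hq
      obtain ⟨r, hr⟩ : ∃ r, ms.find? (fun q => q.2 == pvM ms) = some r := by
        have : (ms.find? (fun q => q.2 == pvM ms)).isSome := by
          rw [List.find?_isSome]
          exact ⟨q, hq, by simp [hqe]⟩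
        exact Option.isSome_iff_exists.mp this
      simp only [pvStepB]
      rw [if_neg (by omega : ¬ ((p.2 : Int) = 0)), if_neg (by omega : ¬ (pvM ms < p.2)), if_pos heq.symm]
      rw [hM, List.find?_append, hr, List.countP_append, List.length_append]
      simp [heq]
    · have hM : pvM (ms ++ [p]) = pvM ms := by rw [pvM_append, max_eq_left (le_of_lt hlt)]
      obtain ⟨q, hq, hqe⟩ : ∃ q ∈ ms, pvM ms = q.2 := by
        rcases pvM_attained ms with h0 | hq
        · exfalso; omega
        · exact hq
      obtain ⟨r, hr⟩ : ∃ r, ms.find? (fun q => q.2 == pvM ms) = some r := by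
        have : (ms.find? (fun q => q.2 == pvM ms)).isSome := by
          rw [List.find?_isSome]
          exact ⟨q, hq, by simp [hqe]⟩
        exact Option.isSome_iff_exists.mp this
      simp only [pvStepB]
      rw [if_neg (by omega : ¬ ((p.2 : Int) = 0)), if_neg (by omega : ¬ (pvM ms < p.2)), if_neg (by omega : ¬ ((p.2 : Int) = pvM ms))]
      rw [hM, List.find?_append, hr, List.countP_append, List.length_append]
      have hpfail : (fun q => q.2 == pvM ms) p = false := by simp; omega
      simp [hpfail]

-- ===== VERDICT (by name: the statement is the Claim_ definition above) =====
theorem pvValidate_dict_eq (d : PySem.Dict String (List (String × String))) :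
    validate_unique_combinations d = pvValidateB d := by
  unfold validate_unique_combinations pvValidateB
  split_ifs
  · rfl
  · exact pvValidate_eq _ _

theorem match_athlete_colors_spec : Claim_equal_match_athlete_colors := by
  intro dk0 db0 ea _
  unfold Spec_match_athlete_colors match_athlete_colors match_athlete_colors_alt
  dsimp only
  rw [← pvValidate_dict_eq]
  set d := PySem.Dict.ofList ea with hd
  by_cases hempty : d.items.isEmpty
  · simp [hempty]
  · simp only [hempty, Bool.false_eq_true, if_false]
    by_cases hv : validate_unique_combinations d
    · simp only [hv, Bool.not_true, Bool.false_eq_true, if_false]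
      by_cases hunk : PySem.Str.lower dk0 = "unknown" ∧ PySem.Str.lower db0 = "unknown"
      · simp [hunk]
      · simp only [hunk, if_false]
        rw [pvBestLoop_eq_foldl, pvFoldl_invariant _ (pvMatches_scores _ _ _)]
        set ms := pvMatchLoopA (PySem.Str.lower dk0) (PySem.Str.lower db0) d.items [] with hmsdef
        by_cases hnil : ms = []
        · simp [hnil]
        · have hlen0 : ¬ (ms.length = 0) := by simp [hnil]
          rcases hsort : PySem.List.sorted ms (fun x => x.2) true with _ | ⟨m, t⟩
          · exact absurd ((PySem.List.sorted_eq_nil_iff ms (fun x => x.2) true).mp hsort) hnil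
          · have hmem : m ∈ ms := (PySem.List.mem_sorted ms (fun x => x.2) true m).mp (hsort ▸ List.mem_cons_self)
            have hub : ∀ y ∈ ms, y.2 ≤ m.2 := by
              have h0 := PySem.List.key_head_sorted_rev_ge ms (fun x : String × Int => x.2) hsort
              simpa using h0
            have hm5 : m.2 = 5 ∨ m.2 = 10 := pvMatches_scores _ _ _ m (hmsdef ▸ hmem)
            have hMm : pvM ms = m.2 := by
              have h1 := pvM_bound ms m hmem
              rcases pvM_attained ms with h0 | ⟨q, hq, he⟩
              · omega
              · have := hub q hq
                omega
            have hperm : (m :: t).Perm ms := hsort ▸ PySem.List.sorted_perm ms (fun x => x.2) true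
            have hcntP : (m :: t).countP (fun x => x.2 == m.2) = ms.countP (fun x => x.2 == m.2) :=
              hperm.countP_eq _
            simp only [hlen0, if_false]
            rw [if_pos (by omega : (5:Int) ≤ m.2)]
            simp only [hMm]
            rw [if_neg (by simpa using hnil : ¬ ((ms.length : Int) = 0)), if_pos (by omega : (5:Int) ≤ m.2)]
            by_cases hone : ms.countP (fun x => x.2 == m.2) = 1
            · have hflen : (ms.filter (fun x => x.2 == m.2)).length = 1 := by
                rw [← List.countP_eq_length_filter]; exact hone
              obtain ⟨a, ha⟩ := List.length_eq_one_iff.mp hflen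
              have hbm : ((m :: t).filter (fun x => x.2 == m.2)).length = 1 := by
                rw [← List.countP_eq_length_filter, hcntP]; exact hone
              obtain ⟨q, hqf⟩ := List.length_eq_one_iff.mp hbm
              have hq_eq_a : q = a := by
                have hqmem : q ∈ (m :: t).filter (fun x => x.2 == m.2) := by simp [hqf]
                have h1 := List.mem_filter.mp hqmem
                have : q ∈ ms.filter (fun x => x.2 == m.2) :=
                  List.mem_filter.mpr ⟨hperm.mem_iff.mp h1.1, h1.2⟩
                rw [ha] at this
                simpa using this
              obtain ⟨r, hr⟩ : ∃ r, ms.find? (fun x => x.2 == m.2) = some r := by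
                have hamem : a ∈ ms.filter (fun x => x.2 == m.2) := by simp [ha]
                have h1 := List.mem_filter.mp hamem
                have : (ms.find? (fun x => x.2 == m.2)).isSome := by
                  rw [List.find?_isSome]
                  exact ⟨a, h1.1, h1.2⟩
                exact Option.isSome_iff_exists.mp this
              have hr_eq_a : r = a := by
                have h1 := List.mem_of_find?_eq_some hr
                have h2 := List.find?_some hr
                have : r ∈ ms.filter (fun x => x.2 == m.2) := List.mem_filter.mpr ⟨h1, h2⟩
                rw [ha] at this
                simpa using this
              rw [if_pos hbm, if_pos (by exact_mod_cast hone), hqf, hr]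
              simp [hq_eq_a, hr_eq_a]
            · have hbm : ¬ (((m :: t).filter (fun x => x.2 == m.2)).length = 1) := by
                rw [← List.countP_eq_length_filter, hcntP]; exact hone
              rw [if_neg hbm, if_neg (by exact_mod_cast hone)]
    · simp [hv]
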